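-- pv_equiv track=rewrite | github.com/dangquyenbui-dotcom/twg_portal_github | auth/decorators.py | _user_has_role
-- ===== SOURCE A (Python) =====
-- ROLE_HIERARCHY = {
--     'Sales.Base': [
--         'Sales.Bookings.View',
--         'Sales.BookingsSummary.View',
--         'Sales.Shipments.View',
--         'Sales.ShipmentsSummary.View',
--         'Sales.OpenOrders.View',
--         'Sales.Dashboard.View',
--         # Future: add new Sales.*.View roles here
--         # 'Sales.TerrPerf.View',
--     ],
-- }
--
-- def _user_has_role(user_roles, required_role):
--     """
--     Check if the user has the required role, either directly or via hierarchy.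
--     Admin always bypasses all checks.
--     """
--     if not user_roles:
--         return False
--
--     # Admin bypasses everything
--     if 'Admin' in user_roles:
--         return True
--
--     # Direct match
--     if required_role in user_roles:
--         return True
--
--     # Hierarchy: check if the user has a higher-level role that implies this one
--     implied_by = ROLE_HIERARCHY.get(required_role, [])
--     for parent_role in implied_by:
--         if parent_role in user_roles:
--             return True
--
--     return False
-- ===== SOURCE B (Python) =====
-- ROLE_HIERARCHY = {
--     'Sales.Base': [
--         'Sales.Bookings.View',
--         'Sales.BookingsSummary.View',
--         'Sales.Shipments.View',
--         'Sales.ShipmentsSummary.View',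
--         'Sales.OpenOrders.View',
--         'Sales.Dashboard.View',
--     ],
-- }
--
-- def _grants(role, required_role):
--     """Does this single role grant the required role?"""
--     if role == 'Admin' or role == required_role:
--         return True
--     return role in ROLE_HIERARCHY.get(required_role, [])
--
-- def _user_has_role(user_roles, required_role):
--     # One pass over the user's roles; empty/None yields False naturally.
--     for role in (user_roles or ()):
--         if _grants(role, required_role):
--             return True
--     return False
-- ===== Notes on version B (the rewrite author's own statement) =====
-- stated objective: alternative
-- what changed: B flips the traversal: a single pass over user_roles testing each role with a per-role predicate _grants (Admin / direct / implies required), instead of A's three sequential membership scans of user_roles plus a loop over the hierarchy list.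
import Mathlib
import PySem

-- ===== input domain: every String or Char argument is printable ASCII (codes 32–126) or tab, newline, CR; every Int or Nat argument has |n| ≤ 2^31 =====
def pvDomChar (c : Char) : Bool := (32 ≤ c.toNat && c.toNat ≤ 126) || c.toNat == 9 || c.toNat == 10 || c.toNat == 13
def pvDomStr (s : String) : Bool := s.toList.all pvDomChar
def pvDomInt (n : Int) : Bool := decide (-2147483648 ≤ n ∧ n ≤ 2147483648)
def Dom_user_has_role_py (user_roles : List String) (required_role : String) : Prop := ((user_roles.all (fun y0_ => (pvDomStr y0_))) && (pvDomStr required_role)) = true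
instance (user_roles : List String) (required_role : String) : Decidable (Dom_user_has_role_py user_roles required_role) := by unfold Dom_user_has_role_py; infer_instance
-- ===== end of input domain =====

-- B makes a single pass over user_roles with a per-role predicate (Admin / direct / implies),
-- replacing A's three sequential membership scans plus hierarchy loop (objective: alternative).


-- ===== PORT A =====
def roleHierarchy : PySem.Dict String (List String) :=
  PySem.Dict.ofList [("Sales.Base",
    ["Sales.Bookings.View", "Sales.BookingsSummary.View", "Sales.Shipments.View",
     "Sales.ShipmentsSummary.View", "Sales.OpenOrders.View", "Sales.Dashboard.View"])]

-- the 'for parent_role in implied_by' loop of A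
def hierLoop (implied_by : List String) (user_roles : List String) : Bool :=
  match implied_by with
  | [] => false
  | p :: rest => if user_roles.contains p then true else hierLoop rest user_roles

def user_has_role_py (user_roles : List String) (required_role : String) : Bool :=
  if user_roles.isEmpty then false
  else if user_roles.contains "Admin" then true
  else if user_roles.contains required_role then true
  else hierLoop (PySem.Dict.getD roleHierarchy required_role []) user_roles

-- ===== PORT B =====
def grantsRole (role required_role : String) : Bool :=
  if role == "Admin" || role == required_role then true
  else (PySem.Dict.getD roleHierarchy required_role []).contains role

def user_has_role_py_alt (user_roles : List String) (required_role : String) : Bool :=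
  match user_roles with
  | [] => false
  | role :: rest =>
    if grantsRole role required_role then true
    else user_has_role_py_alt rest required_role

-- ===== PRECONDITION & SPEC =====
def Spec_user_has_role_py (user_roles : List String) (required_role : String) (out : Bool) : Prop := out = user_has_role_py_alt user_roles required_role
instance (user_roles : List String) (required_role : String) (out : Bool) : Decidable (Spec_user_has_role_py user_roles required_role out) := by unfold Spec_user_has_role_py; infer_instance

-- ===== CLAIM (what is proved, stated in full; the proofs are below) =====
def Claim_equal_user_has_role_py : Prop := ∀ (user_roles : List String) (required_role : String), Dom_user_has_role_py user_roles required_role → Spec_user_has_role_py user_roles required_role (user_has_role_py user_roles required_role)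

-- ===== LEMMAS AND PROOFS =====
theorem hierLoop_eq_any (hs ur : List String) :
    hierLoop hs ur = hs.any ur.contains := by
  induction hs with
  | nil => rfl
  | cons p rest ih =>
    rw [hierLoop, ih, List.any_cons]
    by_cases h : ur.contains p = true
    · rw [if_pos h, h, Bool.true_or]
    · rw [if_neg h, Bool.eq_false_iff.mpr h, Bool.false_or]

theorem alt_eq_any (ur : List String) (req : String) :
    user_has_role_py_alt ur req = ur.any (fun r => grantsRole r req) := by
  induction ur with
  | nil => rfl
  | cons r rest ih =>
    rw [user_has_role_py_alt, ih, List.any_cons]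
    by_cases h : grantsRole r req = true
    · rw [if_pos h, h, Bool.true_or]
    · rw [if_neg h, Bool.eq_false_iff.mpr h, Bool.false_or]

theorem alt_true_iff (ur : List String) (req : String) :
    user_has_role_py_alt ur req = true ↔
      ∃ x ∈ ur, x = "Admin" ∨ x = req ∨ x ∈ PySem.Dict.getD roleHierarchy req [] := by
  rw [alt_eq_any, List.any_eq_true]
  apply exists_congr; intro x
  simp [grantsRole]
  tauto

-- ===== VERDICT (by name: the statement is the Claim_ definition above) =====
theorem user_has_role_py_spec : Claim_equal_user_has_role_py := by
  intro ur req _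
  unfold Spec_user_has_role_py user_has_role_py
  by_cases he : ur.isEmpty
  · rw [List.isEmpty_iff] at he; subst he; rfl
  · simp only [he, Bool.false_eq_true, if_false]
    rw [Bool.eq_iff_iff, alt_true_iff]
    split_ifs with hA hR
    · simp only [true_iff]
      exact ⟨"Admin", by simpa using hA, Or.inl rfl⟩
    · simp only [true_iff]
      exact ⟨req, by simpa using hR, Or.inr (Or.inl rfl)⟩
    · rw [hierLoop_eq_any, List.any_eq_true]
      constructor
      · rintro ⟨p, hp, hpu⟩
        exact ⟨p, by simpa using hpu, Or.inr (Or.inr hp)⟩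
      · rintro ⟨x, hxu, hx | hx | hx⟩
        · exact absurd (by simpa [hx] using hxu) (by simpa using hA)
        · exact absurd (by simpa [hx] using hxu) (by simpa using hR)
        · exact ⟨x, hx, by simpa using hxu⟩
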